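-- pv_equiv track=rewrite | github.com/JanMiksovsky/pondlife-python | src/utils.py | add_next_previous
-- ===== SOURCE A (Python) =====
-- def add_next_previous(docs: dict) -> dict:
--     """Add 'next_key' and 'previous_key' keys to each document in a dict of documents."""
--     keys = list(docs.keys())
--     extended = docs.copy()
--     for i, key in enumerate(keys):
--         doc = extended[key]
--         doc['next_key'] = keys[i + 1] if i < len(keys) - 1 else None
--         doc['previous_key'] = keys[i - 1] if i > 0 else None
--     return extended
-- ===== SOURCE B (Python) =====
-- def add_next_previous(docs: dict) -> dict:
--     """Add 'next_key' and 'previous_key' keys to each document in a dict of documents."""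
--     out = {}
--     prev = None
--     pending = None
--     for key, doc in docs.items():
--         if pending is not None:
--             pk, pd = pending
--             pd['next_key'] = key
--             pd['previous_key'] = prev
--             out[pk] = pd
--             prev = pk
--         pending = (key, doc)
--     if pending is not None:
--         pk, pd = pending
--         pd['next_key'] = None
--         pd['previous_key'] = prev
--         out[pk] = pd
--     return out
-- ===== Notes on version B (the rewrite author's own statement) =====
-- stated objective: alternative
-- what changed: Instead of copying the dict and updating each entry by index arithmetic with bounds-checking conditionals (keys[i+1]/keys[i-1] guarded by i tests), B streams over the items once with a one-element pending buffer and a previous-key accumulator, flushing each buffered document when its successor arrives and building the result dict from scratch.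
import Mathlib
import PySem

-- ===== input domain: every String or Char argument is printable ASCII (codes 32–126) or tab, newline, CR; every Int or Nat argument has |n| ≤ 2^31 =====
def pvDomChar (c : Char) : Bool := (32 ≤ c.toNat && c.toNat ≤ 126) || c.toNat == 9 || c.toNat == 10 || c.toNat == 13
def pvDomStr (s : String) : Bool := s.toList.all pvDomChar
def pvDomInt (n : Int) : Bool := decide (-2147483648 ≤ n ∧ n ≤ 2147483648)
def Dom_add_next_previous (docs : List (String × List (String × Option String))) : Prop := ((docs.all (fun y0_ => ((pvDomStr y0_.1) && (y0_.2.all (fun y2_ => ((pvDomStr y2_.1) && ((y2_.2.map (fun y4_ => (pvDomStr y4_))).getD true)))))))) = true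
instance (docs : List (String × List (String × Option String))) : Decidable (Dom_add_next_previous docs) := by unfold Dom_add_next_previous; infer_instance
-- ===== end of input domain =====

-- B streams once over the items with a one-element pending buffer and a previous-key
-- accumulator, building the result dict from scratch, instead of A's copy-then-update-
-- by-index loop (alternative decomposition, same cost); equivalence is about the return
-- value — in Python both versions also mutate the shared inner doc dicts identically.

-- ===== PORT A =====
-- The dict argument is modelled as an association list: Dict.ofList is the Python
-- dict it denotes (duplicate keys collapse exactly as a Python dict literal does).
def add_next_previous (docs : List (String × List (String × Option String))) : List (String × List (String × Option String)) :=
  let extended := PySem.Dict.ofList docs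
  let keys := extended.keys
  let final := (PySem.List.enumerate keys).foldl (fun ext ik =>
      let doc := ext.getD ik.2 []
      let doc := ((PySem.Dict.ofList doc).insert "next_key"
          (if ik.1 < (keys.length : Int) - 1 then some (PySem.List.pyGetD keys (ik.1 + 1) "") else none)).items
      let doc := ((PySem.Dict.ofList doc).insert "previous_key"
          (if 0 < ik.1 then some (PySem.List.pyGetD keys (ik.1 - 1) "") else none)).items
      ext.insert ik.2 doc) extended
  final.items

-- ===== PORT B =====
-- loop body: flush the pending (key, doc) when its successor arrives
def pvStep_add_next_previous
    (st : PySem.Dict String (List (String × Option String)) × Option String × Option (String × List (String × Option String)))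
    (kd : String × List (String × Option String)) :
    PySem.Dict String (List (String × Option String)) × Option String × Option (String × List (String × Option String)) :=
  match st.2.2 with
  | none => (st.1, st.2.1, some kd)
  | some pending =>
      let pd := ((PySem.Dict.ofList pending.2).insert "next_key" (some kd.1)).items
      let pd := ((PySem.Dict.ofList pd).insert "previous_key" st.2.1).items
      (st.1.insert pending.1 pd, some pending.1, some kd)

-- the trailing flush of the last pending document (next_key = None)
def pvFin_add_next_previous
    (st : PySem.Dict String (List (String × Option String)) × Option String × Option (String × List (String × Option String))) :
    List (String × List (String × Option String)) :=
  match st.2.2 with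
  | none => st.1.items
  | some pending =>
      let pd := ((PySem.Dict.ofList pending.2).insert "next_key" none).items
      let pd := ((PySem.Dict.ofList pd).insert "previous_key" st.2.1).items
      (st.1.insert pending.1 pd).items

def add_next_previous_alt (docs : List (String × List (String × Option String))) : List (String × List (String × Option String)) :=
  pvFin_add_next_previous
    ((PySem.Dict.ofList docs).items.foldl pvStep_add_next_previous (PySem.Dict.empty, none, none))

-- ===== PRECONDITION & SPEC =====
def Spec_add_next_previous (docs : List (String × List (String × Option String))) (out : List (String × List (String × Option String))) : Prop := out = add_next_previous_alt docs
instance (docs : List (String × List (String × Option String))) (out : List (String × List (String × Option String))) : Decidable (Spec_add_next_previous docs out) := by unfold Spec_add_next_previous; infer_instance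

-- ===== CLAIM (what is proved, stated in full; the proofs are below) =====
def Claim_equal_add_next_previous : Prop := ∀ (docs : List (String × List (String × Option String))), Dom_add_next_previous docs → Spec_add_next_previous docs (add_next_previous docs)

-- ===== LEMMAS AND PROOFS =====

-- the common per-document update both ports perform
def pvUpd (doc : List (String × Option String)) (nk pv : Option String) : List (String × Option String) :=
  ((PySem.Dict.ofList (((PySem.Dict.ofList doc).insert "next_key" nk).items)).insert "previous_key" pv).items

-- proof-side spine: what one pass produces for document j (lookahead next, accumulator prev)
def pvWalk_add_next_previous : List (String × List (String × Option String)) → Option String → List (String × List (String × Option String))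
  | [], _ => []
  | (key, doc) :: rest, prev =>
      let doc := ((PySem.Dict.ofList doc).insert "next_key" (rest.head?.map (·.1))).items
      let doc := ((PySem.Dict.ofList doc).insert "previous_key" prev).items
      (key, doc) :: pvWalk_add_next_previous rest (some key)

theorem stream_eq_walk (l : List (String × List (String × Option String)))
    (d : PySem.Dict String (List (String × Option String))) (prev : Option String)
    (pk : String) (pd : List (String × Option String))
    (h1 : d.keys.Nodup) (h2 : (pk :: l.map Prod.fst).Nodup)
    (h3 : ∀ k ∈ pk :: l.map Prod.fst, k ∉ d.keys) :
    pvFin_add_next_previous (l.foldl pvStep_add_next_previous (d, prev, some (pk, pd)))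
      = d.items ++ pvWalk_add_next_previous ((pk, pd) :: l) prev := by
  induction l generalizing d prev pk pd with
  | nil =>
    have hc : d.contains pk = false := by
      rw [← Bool.not_eq_true, PySem.Dict.contains_iff_mem_keys]
      exact h3 pk List.mem_cons_self
    simp only [List.foldl_nil, pvFin_add_next_previous]
    rw [PySem.Dict.items_insert_of_not_contains _ _ hc]
    rfl
  | cons kd t ih =>
    have hc : d.contains pk = false := by
      rw [← Bool.not_eq_true, PySem.Dict.contains_iff_mem_keys]
      exact h3 pk List.mem_cons_self
    rw [List.foldl_cons]
    have hstep : pvStep_add_next_previous (d, prev, some (pk, pd)) kd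
        = (d.insert pk (pvUpd pd (some kd.1) prev), some pk, some (kd.1, kd.2)) := by
      simp [pvStep_add_next_previous, pvUpd]
    rw [hstep]
    have hkeys' : (d.insert pk (pvUpd pd (some kd.1) prev)).keys = d.keys ++ [pk] :=
      PySem.Dict.keys_insert_of_not_contains _ _ hc
    rw [ih (d.insert pk (pvUpd pd (some kd.1) prev)) (some pk) kd.1 kd.2
      (by rw [hkeys']
          rw [List.nodup_append]
          refine ⟨h1, List.nodup_singleton pk, ?_⟩
          intro a ha b hb he
          rw [List.mem_singleton] at hb
          exact h3 a (by rw [he, hb]; exact List.mem_cons_self) ha)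
      (by
        have := h2
        rw [List.map_cons, List.nodup_cons] at this
        simpa using this.2)
      (by intro k hk
          rw [hkeys', List.mem_append, List.mem_singleton]
          push Not
          constructor
          · exact h3 k (List.mem_cons_of_mem pk (by simpa using hk))
          · intro hkpk
            rw [List.map_cons, List.nodup_cons] at h2
            exact h2.1 (hkpk ▸ (by simpa using hk)))]
    rw [PySem.Dict.items_insert_of_not_contains _ _ hc]
    simp [pvWalk_add_next_previous, pvUpd]

theorem alt_eq_walk (docs : List (String × List (String × Option String))) :
    add_next_previous_alt docs
      = pvWalk_add_next_previous (PySem.Dict.ofList docs).items none := by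
  unfold add_next_previous_alt
  have hnd : ((PySem.Dict.ofList docs).items.map Prod.fst).Nodup := by
    have := PySem.Dict.nodup_keys_ofList docs
    simpa [PySem.Dict.keys] using this
  rcases hl : (PySem.Dict.ofList docs).items with _ | ⟨x, t⟩
  · rfl
  · rw [List.foldl_cons]
    have hstep : pvStep_add_next_previous (PySem.Dict.empty, none, none) x
        = (PySem.Dict.empty, none, some (x.1, x.2)) := by
      simp [pvStep_add_next_previous]
    rw [hstep]
    rw [stream_eq_walk t PySem.Dict.empty none x.1 x.2 PySem.Dict.nodup_keys_empty
      (by rw [hl] at hnd; simpa using hnd)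
      (by intro k _; rw [PySem.Dict.keys_empty]; exact List.not_mem_nil)]
    have : PySem.Dict.empty.items = ([] : List (String × List (String × Option String))) := rfl
    rw [this]
    simp

theorem pvWalk_length (l : List (String × List (String × Option String))) (prev : Option String) :
    (pvWalk_add_next_previous l prev).length = l.length := by
  induction l generalizing prev with
  | nil => rfl
  | cons p rest ih => cases p; simp [pvWalk_add_next_previous, ih]

theorem pvWalk_getElem (l : List (String × List (String × Option String))) (prev : Option String)
    (j : Nat) (hj : j < l.length) :
    (pvWalk_add_next_previous l prev)[j]'(by rw [pvWalk_length]; exact hj)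
      = (l[j].1, pvUpd l[j].2 (l[j+1]?.map (·.1)) (if j = 0 then prev else some (l[j-1]'(by omega)).1)) := by
  induction l generalizing prev j with
  | nil => simp at hj
  | cons p rest ih =>
    cases p with
    | mk key doc =>
      cases j with
      | zero =>
        simp [pvWalk_add_next_previous, pvUpd]
        cases rest <;> rfl
      | succ j =>
        have hj' : j < rest.length := by simpa using hj
        have := ih (some key) j hj'
        simp only [pvWalk_add_next_previous, List.getElem_cons_succ]
        rw [this]
        cases j with
        | zero => simp
        | succ j => simp

theorem find?_enumerate_nodup (keys : List String) (h : keys.Nodup) (s : Int) (j : Nat) (hj : j < keys.length) :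
    (PySem.List.enumerate keys s).find? (fun ik => ik.2 == keys[j]) = some (s + j, keys[j]) := by
  induction keys generalizing s j with
  | nil => simp at hj
  | cons k t ih =>
    rw [PySem.List.enumerate_cons]
    cases j with
    | zero => simp
    | succ j =>
      have hj' : j < t.length := by simpa using hj
      have hne : (k == t[j]) = false := by
        simp only [beq_eq_false_iff_ne, ne_eq]
        intro he
        exact (List.nodup_cons.mp h).1 (he ▸ List.getElem_mem hj')
      simp only [List.getElem_cons_succ, List.find?_cons, hne]
      rw [ih (List.nodup_cons.mp h).2 (s+1) j hj']
      congr 1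
      push_cast
      ring_nf

theorem foldl_insert_getD_items
    (V : (Int × String) → List (String × Option String) → List (String × Option String))
    (L : List (Int × String)) (e : PySem.Dict String (List (String × Option String)))
    (hL : (L.map Prod.snd).Nodup) (he : e.keys.Nodup) (hmem : ∀ ik ∈ L, ik.2 ∈ e.keys) :
    (L.foldl (fun ext ik => ext.insert ik.2 (V ik (ext.getD ik.2 []))) e).items
      = e.items.map (fun p => match L.find? (fun ik => ik.2 == p.1) with
          | some ik => (p.1, V ik p.2)
          | none => p) := by
  induction L generalizing e with
  | nil => simp
  | cons a t ih =>
    have hcont : e.contains a.2 = true := by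
      rw [PySem.Dict.contains_iff_mem_keys]
      exact hmem a List.mem_cons_self
    have hkeys' : (e.insert a.2 (V a (e.getD a.2 []))).keys = e.keys :=
      PySem.Dict.keys_insert_of_contains _ _ hcont
    rw [List.foldl_cons, ih (e.insert a.2 (V a (e.getD a.2 [])))
        (by simpa using (List.nodup_cons.mp (by simpa using hL)).2)
        (by rw [hkeys']; exact he)
        (by intro ik hik; rw [hkeys']; exact hmem ik (List.mem_cons_of_mem a hik))]
    rw [PySem.Dict.items_insert_of_contains _ _ hcont, List.map_map]
    apply List.map_congr_left
    intro p hp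
    obtain ⟨p1, p2⟩ := p
    have hL' := hL
    rw [List.map_cons, List.nodup_cons] at hL'
    simp only [Function.comp_apply, List.find?_cons]
    by_cases hpk : p1 = a.2
    · subst hpk
      have hfind_t : t.find? (fun ik => ik.2 == a.2) = none := by
        rw [List.find?_eq_none]
        intro ik hik
        simp only [beq_iff_eq]
        intro he2
        exact hL'.1 (he2 ▸ (List.mem_map_of_mem (f := Prod.snd) hik))
      have hgd : e.getD a.2 [] = p2 := PySem.Dict.getD_of_mem_items _ hp he _
      simp [hfind_t, hgd]
    · have hb1 : (p1 == a.2) = false := by simp [hpk]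
      have hb2 : (a.2 == p1) = false := by simp [Ne.symm hpk]
      simp [hb1, hb2]

theorem ports_agree (docs : List (String × List (String × Option String))) :
    add_next_previous docs = add_next_previous_alt docs := by
  have he : (PySem.Dict.ofList docs).keys.Nodup := PySem.Dict.nodup_keys_ofList docs
  have hkeys_eq : (PySem.Dict.ofList docs).keys = (PySem.Dict.ofList docs).items.map Prod.fst := by
    simp only [PySem.Dict.keys]
  -- B side: the buffered stream produces exactly the walk spine
  have hB : add_next_previous_alt docs
      = pvWalk_add_next_previous (PySem.Dict.ofList docs).items none := alt_eq_walk docs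
  -- A side: the insert-fold over the enumerated keys is a pointwise map over the items
  have hA : add_next_previous docs
      = (PySem.Dict.ofList docs).items.map (fun p =>
          match (PySem.List.enumerate (PySem.Dict.ofList docs).keys 0).find? (fun ik => ik.2 == p.1) with
          | some ik => (p.1, pvUpd p.2
              (if ik.1 < ((PySem.Dict.ofList docs).keys.length : Int) - 1
               then some (PySem.List.pyGetD (PySem.Dict.ofList docs).keys (ik.1 + 1) "") else none)
              (if 0 < ik.1
               then some (PySem.List.pyGetD (PySem.Dict.ofList docs).keys (ik.1 - 1) "") else none))
          | none => p) := by
    unfold add_next_previous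
    exact foldl_insert_getD_items
      (V := fun ik doc => pvUpd doc
        (if ik.1 < ((PySem.Dict.ofList docs).keys.length : Int) - 1
         then some (PySem.List.pyGetD (PySem.Dict.ofList docs).keys (ik.1 + 1) "") else none)
        (if 0 < ik.1
         then some (PySem.List.pyGetD (PySem.Dict.ofList docs).keys (ik.1 - 1) "") else none))
      _ _ (by rw [show (Prod.snd : Int × String → String) = fun x => x.2 from rfl, PySem.List.map_snd_enumerate]; exact he) he
      (by intro ik hik
          rw [PySem.List.mem_enumerate_iff] at hik
          obtain ⟨k, hk, rfl⟩ := hik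
          exact List.getElem_mem hk)
  rw [hA, hB]
  set e := PySem.Dict.ofList docs with hedef
  have hlen : e.keys.length = e.items.length := by rw [hkeys_eq, List.length_map]
  apply List.ext_getElem
  · rw [List.length_map, pvWalk_length]
  · intro j hj1 hj2
    have hj : j < e.items.length := by simpa using hj1
    have hjk : j < e.keys.length := by omega
    have hkj : e.keys[j]'hjk = (e.items[j]'hj).1 := by
      simp [hkeys_eq]
    rw [List.getElem_map, pvWalk_getElem _ _ j hj]
    rw [show (e.items[j]'hj).1 = e.keys[j]'hjk from hkj.symm]
    rw [find?_enumerate_nodup e.keys he 0 j hjk]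
    simp only []
    congr 1
    congr 1
    · -- next_key values agree
      by_cases hlast : j + 1 < e.items.length
      · have hcond : (0 : Int) + (j : Nat) < (e.keys.length : Int) - 1 := by
          omega
        rw [if_pos hcond]
        have : (0 : Int) + (j : Nat) + 1 = ((j + 1 : Nat) : Int) := by push_cast; ring
        rw [this, PySem.List.pyGetD_natCast]
        rw [List.getElem?_eq_getElem hlast]
        have hj1k : j + 1 < e.keys.length := by omega
        rw [List.getD_eq_getElem?_getD, List.getElem?_eq_getElem hj1k]
        simp [hkeys_eq]
      · have hcond : ¬ ((0 : Int) + (j : Nat) < (e.keys.length : Int) - 1) := by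
          omega
        rw [if_neg hcond]
        rw [List.getElem?_eq_none (by omega)]
        rfl
    · -- previous_key values agree
      cases j with
      | zero => simp
      | succ j =>
        have hcond : (0 : Int) < (0 : Int) + ((j + 1 : Nat) : Int) := by positivity
        rw [if_pos hcond]
        have : (0 : Int) + ((j + 1 : Nat) : Int) - 1 = ((j : Nat) : Int) := by push_cast; ring
        rw [this, PySem.List.pyGetD_natCast]
        have hjk' : j < e.keys.length := by omega
        rw [List.getD_eq_getElem?_getD, List.getElem?_eq_getElem hjk']
        simp [hkeys_eq]

-- ===== VERDICT (by name: the statement is the Claim_ definition above) =====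
theorem add_next_previous_spec : Claim_equal_add_next_previous := by
  intro docs _
  unfold Spec_add_next_previous
  exact ports_agree docs
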